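-- pv_equiv track=rewrite | github.com/qazmaxlow/edms | utils/calculation.py | combine_readings_by_timestamp
-- ===== SOURCE A (Python) =====
-- def combine_readings_by_timestamp(sources_readings):
-- 	result = {}
-- 	for _, readings in sources_readings.items():
-- 		for timestamp, val in readings.items():
-- 			if timestamp in result:
-- 				result[timestamp] += val
-- 			else:
-- 				result[timestamp] = val
--
-- 	return result
-- ===== SOURCE B (Python) =====
-- def combine_readings_by_timestamp(sources_readings):
--     # Two-pass decomposition: group values per timestamp, then reduce each group.
--     groups = {}
--     for readings in sources_readings.values():
--         for timestamp, val in readings.items():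
--             groups[timestamp] = groups.get(timestamp, []) + [val]
--     result = {}
--     for timestamp, vals in groups.items():
--         acc = vals[0]
--         for v in vals[1:]:
--             acc += v
--         result[timestamp] = acc
--     return result
-- ===== Notes on version B (the rewrite author's own statement) =====
-- stated objective: alternative
-- what changed: Replaces A's single-pass running-total dict with a two-pass decomposition: first group every reading value into a list per timestamp, then reduce each group left-to-right (first element seeds the accumulator) into the result dict.
import Mathlib
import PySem

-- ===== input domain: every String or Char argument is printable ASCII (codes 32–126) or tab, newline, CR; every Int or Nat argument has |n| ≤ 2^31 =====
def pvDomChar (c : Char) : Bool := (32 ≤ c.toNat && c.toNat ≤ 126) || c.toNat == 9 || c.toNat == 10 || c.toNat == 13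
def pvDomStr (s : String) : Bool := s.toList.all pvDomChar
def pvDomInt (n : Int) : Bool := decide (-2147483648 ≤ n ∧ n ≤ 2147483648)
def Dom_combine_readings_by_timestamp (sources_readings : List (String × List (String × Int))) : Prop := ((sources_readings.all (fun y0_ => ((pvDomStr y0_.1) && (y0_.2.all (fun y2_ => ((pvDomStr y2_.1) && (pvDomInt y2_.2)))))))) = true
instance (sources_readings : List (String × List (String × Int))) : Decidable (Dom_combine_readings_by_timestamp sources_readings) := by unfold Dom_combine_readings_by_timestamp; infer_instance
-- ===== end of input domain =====

-- B replaces A's single-pass running-total dict with a two-pass grouping-then-reduce decomposition (alternative, same cost).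


-- ===== PORT A =====
-- for _, readings in sources_readings.items(): for timestamp, val in readings.items():
--   if timestamp in result: result[timestamp] += val else: result[timestamp] = val
def combine_readings_by_timestamp (sources_readings : List (String × List (String × Int))) : List (String × Int) :=
  (sources_readings.foldl
    (fun result pr =>
      pr.2.foldl
        (fun result p =>
          if result.contains p.1 then result.modify p.1 0 (· + p.2)
          else result.insert p.1 p.2)
        result)
    PySem.Dict.empty).items

-- ===== PORT B =====
-- acc = vals[0]; for v in vals[1:]: acc += v   (vals is never [] in Source B; 0 is an unreachable placeholder)
def pvRed (vs : List Int) : Int :=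
  match vs with
  | [] => 0
  | h :: t => t.foldl (· + ·) h

def combine_readings_by_timestamp_alt (sources_readings : List (String × List (String × Int))) : List (String × Int) :=
  -- pass 1: groups[timestamp] = groups.get(timestamp, []) + [val]
  let groups : PySem.Dict String (List Int) :=
    sources_readings.foldl
      (fun g pr => pr.2.foldl (fun g p => g.modify p.1 [] (· ++ [p.2])) g)
      PySem.Dict.empty
  -- pass 2: result[timestamp] = reduce of vals
  let result : PySem.Dict String Int :=
    groups.items.foldl (fun r p => r.insert p.1 (pvRed p.2)) PySem.Dict.empty
  result.items

-- ===== PRECONDITION & SPEC =====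
def Spec_combine_readings_by_timestamp (sources_readings : List (String × List (String × Int))) (out : List (String × Int)) : Prop := out = combine_readings_by_timestamp_alt sources_readings
instance (sources_readings : List (String × List (String × Int))) (out : List (String × Int)) : Decidable (Spec_combine_readings_by_timestamp sources_readings out) := by unfold Spec_combine_readings_by_timestamp; infer_instance

-- ===== CLAIM (what is proved, stated in full; the proofs are below) =====
def Claim_equal_combine_readings_by_timestamp : Prop := ∀ (sources_readings : List (String × List (String × Int))), Dom_combine_readings_by_timestamp sources_readings → Spec_combine_readings_by_timestamp sources_readings (combine_readings_by_timestamp sources_readings)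

-- ===== LEMMAS AND PROOFS =====

theorem pvRed_append (vs : List Int) (v : Int) : pvRed (vs ++ [v]) = pvRed vs + v := by
  cases vs <;> simp [pvRed, List.foldl_append]

-- Invariant of the two loops over the same flat pair list: equal key lists, and A's
-- running total at each key is the reduction of B's group at that key.
theorem pv_loop_inv (L : List (String × Int)) (d : PySem.Dict String Int)
    (g : PySem.Dict String (List Int))
    (hk : d.keys = g.keys)
    (hv : ∀ k, d.getD k 0 = pvRed (g.getD k [])) :
    (L.foldl (fun d p => if d.contains p.1 then d.modify p.1 0 (· + p.2) else d.insert p.1 p.2) d).keys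
      = (L.foldl (fun g p => g.modify p.1 [] (· ++ [p.2])) g).keys
    ∧ ∀ k, (L.foldl (fun d p => if d.contains p.1 then d.modify p.1 0 (· + p.2) else d.insert p.1 p.2) d).getD k 0
      = pvRed ((L.foldl (fun g p => g.modify p.1 [] (· ++ [p.2])) g).getD k []) := by
  induction L generalizing d g with
  | nil => exact ⟨hk, hv⟩
  | cons p rest ih =>
    obtain ⟨ts, v⟩ := p
    have hc : d.contains ts = g.contains ts := by
      rw [PySem.Dict.contains_eq_decide_mem_keys, PySem.Dict.contains_eq_decide_mem_keys, hk]
    by_cases hmem : g.contains ts = true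
    · simp only [List.foldl_cons, hc, hmem, if_pos]
      apply ih
      · rw [PySem.Dict.keys_modify, PySem.Dict.keys_modify,
          PySem.Dict.keys_insert_of_contains _ _ (by rw [hc]; exact hmem),
          PySem.Dict.keys_insert_of_contains _ _ hmem, hk]
      · intro k
        rw [PySem.Dict.getD_modify, PySem.Dict.getD_modify]
        by_cases hkts : k = ts
        · simp [hkts, hv ts, pvRed_append]
        · simp [hkts, hv k]
    · have hmem' : g.contains ts = false := by simpa using hmem
      simp only [List.foldl_cons, hc, hmem', if_neg, Bool.false_eq_true, not_false_iff]
      apply ih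
      · rw [PySem.Dict.keys_modify,
          PySem.Dict.keys_insert_of_not_contains _ _ (by rw [hc]; exact hmem'),
          PySem.Dict.keys_insert_of_not_contains _ _ (by
            simpa [PySem.Dict.contains_modify] using hmem'), hk]
      · intro k
        rw [PySem.Dict.getD_insert, PySem.Dict.getD_modify]
        by_cases hkts : k = ts
        · simp [hkts, PySem.Dict.getD_of_not_contains _ _ hmem', pvRed]
        · simp [hkts, hv k]

-- ===== VERDICT (by name: the statement is the Claim_ definition above) =====
theorem combine_readings_by_timestamp_spec : Claim_equal_combine_readings_by_timestamp := by
  intro srcs _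
  unfold Spec_combine_readings_by_timestamp combine_readings_by_timestamp combine_readings_by_timestamp_alt
  -- flatten both nested loops into folds over the same flat pair list L
  have flatA : ∀ (e : PySem.Dict String Int),
      srcs.foldl (fun d pr => pr.2.foldl (fun d p => if d.contains p.1 then d.modify p.1 0 (· + p.2) else d.insert p.1 p.2) d) e
        = ((srcs.map (·.2)).flatten).foldl (fun d p => if d.contains p.1 then d.modify p.1 0 (· + p.2) else d.insert p.1 p.2) e := by
    intro e; rw [List.foldl_flatten, List.foldl_map]
  have flatB : ∀ (e : PySem.Dict String (List Int)),
      srcs.foldl (fun g pr => pr.2.foldl (fun g p => g.modify p.1 [] (· ++ [p.2])) g) e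
        = ((srcs.map (·.2)).flatten).foldl (fun g p => g.modify p.1 [] (· ++ [p.2])) e := by
    intro e; rw [List.foldl_flatten, List.foldl_map]
  rw [flatA, flatB]
  set L := (srcs.map (·.2)).flatten with hL
  set dA := L.foldl (fun d p => if d.contains p.1 then d.modify p.1 0 (· + p.2) else d.insert p.1 p.2) PySem.Dict.empty with hdA
  set gD := L.foldl (fun g p => g.modify p.1 [] (· ++ [p.2])) PySem.Dict.empty with hgD
  have inv := pv_loop_inv L PySem.Dict.empty PySem.Dict.empty
    (by simp [PySem.Dict.keys_empty]) (by intro k; simp [PySem.Dict.getD_empty, pvRed])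
  rw [← hdA, ← hgD] at inv
  obtain ⟨hkeys, hvals⟩ := inv
  have hgnd : gD.keys.Nodup := by
    rw [hgD]
    exact PySem.Dict.nodup_keys_foldl_modify_key L Prod.fst [] (fun _ p vs => vs ++ [p.2])
      PySem.Dict.empty (by simp [PySem.Dict.keys_empty])
  have hdnd : dA.keys.Nodup := by rw [hkeys]; exact hgnd
  have hfresh : (gD.items.foldl (fun r p => r.insert p.1 (pvRed p.2)) PySem.Dict.empty).items
      = [] ++ gD.items.map (fun p => (p.1, pvRed p.2)) := by
    have := PySem.Dict.items_foldl_insert_fresh gD.items Prod.fst (fun p => pvRed p.2)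
      PySem.Dict.empty (by intro a _; simp [PySem.Dict.contains_empty]) (by exact hgnd)
    simpa [PySem.Dict.empty] using this
  show dA.items = _
  rw [hfresh, List.nil_append,
    PySem.Dict.items_eq_map_keys dA hdnd 0,
    PySem.Dict.items_eq_map_keys gD hgnd [],
    List.map_map, hkeys]
  exact List.map_congr_left (fun k _ => by simp [Function.comp, hvals k])
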